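-- pv_equiv track=rewrite | github.com/whoiswillma/nlp-experiments | luke_util.py | take_closure_over_entity_spans_to_labels
-- ===== SOURCE A (Python) =====
-- from typing import Collection, Optional, Union, TypeVar
--
-- EntityTokenSpan = tuple[int, int]
--
-- def take_closure_over_entity_spans_to_labels(
--     entity_spans_to_labels: dict[EntityTokenSpan, int]
-- ) -> dict[EntityTokenSpan, int]:
--     """Returns a closure over `entity_spans_to_labels` such that, for every
--     entity span (i, j) and associated label l, all sub spans (i', j') such that
--     i <= i' < j' <= j is associated with l in its closure.
--     """
--
--     if len(entity_spans_to_labels) == 0: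
--         return {}
--
--     idx_to_label: list[Optional[int]] = [None] * max(
--         end for _, end in entity_spans_to_labels
--     )
--     for entity_span, label in entity_spans_to_labels.items():
--         start, end = entity_span
--         for i in range(start, end):
--             idx_to_label[i] = label
--
--     closure: dict[EntityTokenSpan, int] = {}
--
--     def add_all_spans_to_closure(start, end, label):
--         for inner_start in range(start, end):
--             for inner_end in range(inner_start + 1, end + 1):
--                 closure[(inner_start, inner_end)] = label
--
--     prev_label = None
--     start_index = None
--
--     # causes loop body to execute one more time if current_label != None
--     idx_to_label += [None]
--
--     for i, label in enumerate(idx_to_label):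
--         if prev_label != label:
--             if prev_label is not None:
--                 add_all_spans_to_closure(start_index, i, prev_label)
--
--             prev_label = label
--             start_index = i
--
--     return closure
-- ===== SOURCE B (Python) =====
-- def take_closure_over_entity_spans_to_labels(entity_spans_to_labels):
--     """Single pass over the index-to-label table: for each start index whose
--     label is set, extend the end inline while the label stays the same,
--     emitting every subspan -- no sentinel append and no run state machine."""
--     if len(entity_spans_to_labels) == 0:
--         return {}
--
--     idx_to_label = [None] * max(end for _, end in entity_spans_to_labels)
--     for (start, end), label in entity_spans_to_labels.items():
--         for i in range(start, end):
--             idx_to_label[i] = label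
--
--     closure = {}
--     n = len(idx_to_label)
--     for i in range(n):
--         label = idx_to_label[i]
--         if label is None:
--             continue
--         end = i + 1
--         closure[(i, end)] = label
--         while end < n and idx_to_label[end] == label:
--             end += 1
--             closure[(i, end)] = label
--     return closure
-- ===== Notes on version B (the rewrite author's own statement) =====
-- stated objective: alternative
-- what changed: Replaces A's sentinel-append plus prev_label/start_index run state machine (which materializes run boundaries and then emits all subspans of each run with a helper) by a direct single pass: for each start index with a label, the run end is extended inline while the label repeats, emitting each subspan as the end grows.
import Mathlib
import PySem

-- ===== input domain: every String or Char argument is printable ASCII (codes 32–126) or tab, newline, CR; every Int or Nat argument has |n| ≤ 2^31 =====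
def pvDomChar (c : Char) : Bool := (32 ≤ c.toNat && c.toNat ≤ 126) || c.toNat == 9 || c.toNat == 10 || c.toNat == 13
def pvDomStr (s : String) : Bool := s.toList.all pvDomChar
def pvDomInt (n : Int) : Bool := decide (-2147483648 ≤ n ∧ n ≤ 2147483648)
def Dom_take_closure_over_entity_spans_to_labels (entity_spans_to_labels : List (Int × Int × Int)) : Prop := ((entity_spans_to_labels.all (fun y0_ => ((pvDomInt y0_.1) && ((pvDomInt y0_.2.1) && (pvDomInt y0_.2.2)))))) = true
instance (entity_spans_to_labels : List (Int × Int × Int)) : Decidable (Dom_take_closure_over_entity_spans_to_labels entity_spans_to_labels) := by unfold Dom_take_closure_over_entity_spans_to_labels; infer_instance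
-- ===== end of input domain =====

-- B replaces A's sentinel-append + prev_label/start_index run state machine by a
-- single pass that, at each labelled start index, extends the end inline while the
-- label repeats, emitting each subspan as the end grows (objective: alternative).
-- The tester converts the association list to a Python dict (first binding wins);
-- both ports iterate the list directly, which agrees on the duplicate-free lists
-- the dict-typed generator produces.

-- ===== PORT A =====
-- shared first phase (the idx_to_label construction is line-for-line the same in Source A and Source B):
-- idx_to_label = [None] * max(end for _, end in d); for (start, end), label: for i in range(start, end): idx_to_label[i] = label
def pvBuildTable (l : List (Int × Int × Int)) : List (Option Int) :=
  let maxEnd : Int := (PySem.List.max? (l.map fun x => x.2.1) (fun y => y)).getD 0  -- l ≠ [] at call sites, so getD's default is never used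
  l.foldl
    (fun t x =>
      (PySem.List.pyRange x.1 x.2.1 1).foldl (fun t i => PySem.List.pySetD t i (some x.2.2)) t)
    (List.replicate maxEnd.toNat none)

-- add_all_spans_to_closure(start, end, label)
def pvAddAll (s e pl : Int) (c : PySem.Dict (Int × Int) Int) : PySem.Dict (Int × Int) Int :=
  (PySem.List.pyRange s e 1).foldl
    (fun c a => (PySem.List.pyRange (a + 1) (e + 1) 1).foldl (fun c b => c.insert (a, b) pl) c) c

-- the body of A's `for i, label in enumerate(idx_to_label)` loop; state = (closure, prev_label, start_index)
def pvAStep (st : PySem.Dict (Int × Int) Int × Option Int × Option Int) (p : Int × Option Int) :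
    PySem.Dict (Int × Int) Int × Option Int × Option Int :=
  if st.2.1 ≠ p.2 then
    ((match st.2.1 with
      | some pl => pvAddAll (st.2.2.getD 0) p.1 pl st.1  -- start_index is set whenever prev_label is some, so getD's default is never read
      | none => st.1),
     p.2, some p.1)
  else st

def take_closure_over_entity_spans_to_labels (entity_spans_to_labels : List (Int × Int × Int)) : List (Int × Int × Int) :=
  if entity_spans_to_labels.length = 0 then []
  else
    let st := (PySem.List.enumerate (pvBuildTable entity_spans_to_labels ++ [none]) 0).foldl
      pvAStep (PySem.Dict.empty, none, none)
    st.1.items.map (fun kv => (kv.1.1, kv.1.2, kv.2))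

-- ===== PORT B =====
-- the `while end < n and idx_to_label[end] == label: end += 1; closure[(i, end)] = label` loop
def pvExtend (t : List (Option Int)) (i : Nat) (lab : Int) (e : Nat) (c : PySem.Dict (Int × Int) Int) :
    PySem.Dict (Int × Int) Int :=
  if h : e < t.length ∧ t.getD e none = some lab then
    pvExtend t i lab (e + 1) (c.insert ((i : Int), (e : Int) + 1) lab)
  else c
termination_by t.length - e
decreasing_by omega

-- body of B's `for i in range(n)` loop
def pvBStep (t : List (Option Int)) (c : PySem.Dict (Int × Int) Int) (i : Nat) :
    PySem.Dict (Int × Int) Int :=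
  match t.getD i none with
  | none => c
  | some lab => pvExtend t i lab (i + 1) (c.insert ((i : Int), (i : Int) + 1) lab)

def take_closure_over_entity_spans_to_labels_alt (entity_spans_to_labels : List (Int × Int × Int)) : List (Int × Int × Int) :=
  if entity_spans_to_labels.length = 0 then []
  else
    let t := pvBuildTable entity_spans_to_labels
    ((List.range t.length).foldl (pvBStep t) PySem.Dict.empty).items.map
      (fun kv => (kv.1.1, kv.1.2, kv.2))

-- ===== PRECONDITION & SPEC =====
def pvMaxEnd (l : List (Int × Int × Int)) : Int := (l.map fun x => x.2.1).foldl max 0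

-- Pre_ excludes exactly the inputs on which the Python raises IndexError while filling
-- idx_to_label: some span with start < end whose writes fall below -max_end, or any such
-- span when max_end ≤ 0 (the table is then empty).
def Pre_take_closure_over_entity_spans_to_labels (entity_spans_to_labels : List (Int × Int × Int)) : Prop :=
  ∀ x ∈ entity_spans_to_labels, x.1 < x.2.1 →
    0 < pvMaxEnd entity_spans_to_labels ∧ -(pvMaxEnd entity_spans_to_labels) ≤ x.1
instance (entity_spans_to_labels : List (Int × Int × Int)) : Decidable (Pre_take_closure_over_entity_spans_to_labels entity_spans_to_labels) := by unfold Pre_take_closure_over_entity_spans_to_labels; infer_instance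

def pvWitness_take_closure_over_entity_spans_to_labels : (List (Int × Int × Int)) := [(0, 2, 5), (1, 3, 7)]

def Spec_take_closure_over_entity_spans_to_labels (entity_spans_to_labels : List (Int × Int × Int)) (out : List (Int × Int × Int)) : Prop := out = take_closure_over_entity_spans_to_labels_alt entity_spans_to_labels
instance (entity_spans_to_labels : List (Int × Int × Int)) (out : List (Int × Int × Int)) : Decidable (Spec_take_closure_over_entity_spans_to_labels entity_spans_to_labels out) := by unfold Spec_take_closure_over_entity_spans_to_labels; infer_instance

-- ===== CLAIM (what is proved, stated in full; the proofs are below) =====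
def Claim_equal_take_closure_over_entity_spans_to_labels : Prop := ∀ (entity_spans_to_labels : List (Int × Int × Int)), Dom_take_closure_over_entity_spans_to_labels entity_spans_to_labels → Pre_take_closure_over_entity_spans_to_labels entity_spans_to_labels → Spec_take_closure_over_entity_spans_to_labels entity_spans_to_labels (take_closure_over_entity_spans_to_labels entity_spans_to_labels)

-- ===== LEMMAS AND PROOFS =====
-- The equality is in fact unconditional: both ports share the table construction, and
-- the two emission phases are proved to perform the same insertions in the same order.

def pvF (t : List (Option Int)) (j : Nat) : Option Int := t.getD j none

def pvIns (c : PySem.Dict (Int × Int) Int) (kv : (Int × Int) × Int) : PySem.Dict (Int × Int) Int :=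
  c.insert kv.1 kv.2

def pvFoldIns (c : PySem.Dict (Int × Int) Int) (L : List ((Int × Int) × Int)) : PySem.Dict (Int × Int) Int :=
  L.foldl pvIns c

-- first j' ≥ j with t[j'] ≠ lab (or the table length)
def pvRend (t : List (Option Int)) (j : Nat) (lab : Int) : Nat :=
  if h : j < t.length ∧ pvF t j = some lab then pvRend t (j + 1) lab else j
termination_by t.length - j
decreasing_by omega

def pvRow (i r : Nat) (lab : Int) : List ((Int × Int) × Int) :=
  (List.range' (i + 1) (r - i)).map (fun e : Nat => (((i : Int), (e : Int)), lab))

def pvG (t : List (Option Int)) (j : Nat) : List ((Int × Int) × Int) :=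
  match pvF t j with
  | none => []
  | some lab => pvRow j (pvRend t (j + 1) lab) lab

def pvBlock (s r : Nat) (lab : Int) : List ((Int × Int) × Int) :=
  (List.range' s (r - s)).flatMap (fun a => pvRow a r lab)

def pvEfrom (t : List (Option Int)) (j : Nat) : List ((Int × Int) × Int) :=
  (List.range' j (t.length - j)).flatMap (pvG t)

def pvStepA (t : List (Option Int)) (st : PySem.Dict (Int × Int) Int × Option Int × Option Int) (j : Nat) :
    PySem.Dict (Int × Int) Int × Option Int × Option Int :=
  pvAStep st ((j : Int), pvF t j)

def pvMach (t : List (Option Int)) (j : Nat) (st : PySem.Dict (Int × Int) Int × Option Int × Option Int) :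
    PySem.Dict (Int × Int) Int × Option Int × Option Int :=
  (List.range' j ((t.length + 1) - j)).foldl (pvStepA t) st

-- basic facts
theorem pvF_of_ge (t : List (Option Int)) (j : Nat) (hj : t.length ≤ j) : pvF t j = none := by
  simp [pvF, List.getD, List.getElem?_eq_none hj]

theorem pvF_append_sentinel (t : List (Option Int)) (j : Nat) :
    (t ++ [none]).getD j none = pvF t j := by
  induction t generalizing j with
  | nil => cases j <;> simp [pvF]
  | cons a t ih =>
    cases j with
    | zero => simp [pvF]
    | succ j => simpa [pvF] using ih j

theorem pvFoldIns_append (c : PySem.Dict (Int × Int) Int) (L M : List ((Int × Int) × Int)) :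
    pvFoldIns c (L ++ M) = pvFoldIns (pvFoldIns c L) M := by
  simp [pvFoldIns]

theorem pvFoldl_flatMap {α β : Type} (g : α → List β) (f : PySem.Dict (Int × Int) Int → β → PySem.Dict (Int × Int) Int)
    (l : List α) (c : PySem.Dict (Int × Int) Int) :
    (l.flatMap g).foldl f c = l.foldl (fun c a => (g a).foldl f c) c := by
  induction l generalizing c with
  | nil => rfl
  | cons a l ih => simp [List.flatMap_cons, List.foldl_append, ih]

theorem pvPyRange_natCast (a b : Nat) :
    PySem.List.pyRange (a : Int) (b : Int) 1 = (List.range' a (b - a)).map (fun k : Nat => (k : Int)) := by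
  rw [PySem.List.pyRange_one]
  have h : ((b : Int) - a).toNat = b - a := by omega
  rw [h]
  apply List.ext_getElem
  · simp
  · intro k h1 h2
    rw [List.getElem_map, List.getElem_map, List.getElem_range, List.getElem_range']
    push_cast
    ring

-- pvRend facts
theorem pvRend_ge (t : List (Option Int)) (j : Nat) (lab : Int) : j ≤ pvRend t j lab := by
  fun_induction pvRend t j lab with
  | case1 j h ih => omega
  | case2 j h => omega

theorem pvRend_of_stop (t : List (Option Int)) (j : Nat) (lab : Int)
    (h : ¬(j < t.length ∧ pvF t j = some lab)) : pvRend t j lab = j := by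
  rw [pvRend]
  simp [h]

theorem pvRend_of_step (t : List (Option Int)) (j : Nat) (lab : Int)
    (h1 : j < t.length) (h2 : pvF t j = some lab) : pvRend t j lab = pvRend t (j + 1) lab := by
  rw [pvRend]
  simp [h1, h2]

-- pvEfrom decompositions
theorem pvEfrom_stop (t : List (Option Int)) (j : Nat) (hj : t.length ≤ j) : pvEfrom t j = [] := by
  simp [pvEfrom, Nat.sub_eq_zero_of_le hj]

theorem pvEfrom_cons (t : List (Option Int)) (j : Nat) (hj : j < t.length) :
    pvEfrom t j = pvG t j ++ pvEfrom t (j + 1) := by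
  have h : t.length - j = (t.length - (j + 1)) + 1 := by omega
  rw [pvEfrom, h, List.range'_succ, List.flatMap_cons]
  rfl

theorem pvEfrom_run (t : List (Option Int)) (j : Nat) (lab : Int)
    (hj : j < t.length) (hl : pvF t j = some lab) :
    pvEfrom t j = pvBlock j (pvRend t (j + 1) lab) lab ++ pvEfrom t (pvRend t (j + 1) lab) := by
  have H : ∀ k j lab, t.length - j ≤ k → j < t.length → pvF t j = some lab →
      pvEfrom t j = pvBlock j (pvRend t (j + 1) lab) lab ++ pvEfrom t (pvRend t (j + 1) lab) := by
    intro k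
    induction k with
    | zero => intro j lab hk hj hl; omega
    | succ k ih =>
      intro j lab hk hj hl
      have hge : j + 1 ≤ pvRend t (j + 1) lab := pvRend_ge t (j + 1) lab
      have hgj : pvG t j = pvRow j (pvRend t (j + 1) lab) lab := by rw [pvG, hl]
      rw [pvEfrom_cons t j hj, hgj]
      by_cases hnext : j + 1 < t.length ∧ pvF t (j + 1) = some lab
      · have hr2 : pvRend t (j + 1) lab = pvRend t (j + 2) lab :=
          pvRend_of_step t (j + 1) lab hnext.1 hnext.2
        have ih2 := ih (j + 1) lab (by omega) hnext.1 hnext.2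
        rw [← hr2] at ih2
        rw [ih2, ← List.append_assoc]
        congr 1
        rw [pvBlock, pvBlock,
          show pvRend t (j + 1) lab - j = (pvRend t (j + 1) lab - (j + 1)) + 1 from by omega,
          List.range'_succ, List.flatMap_cons]
      · have hr1 : pvRend t (j + 1) lab = j + 1 := pvRend_of_stop t (j + 1) lab hnext
        rw [hr1]
        congr 1
        rw [pvBlock, show j + 1 - j = 1 from by omega]
        simp [List.range']
  exact H (t.length - j) j lab le_rfl hj hl

-- the A-side nested emission helper performs exactly the pvBlock insertions
theorem pvAddAll_eq (s r : Nat) (pl : Int) (c : PySem.Dict (Int × Int) Int) :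
    pvAddAll (s : Int) (r : Int) pl c = pvFoldIns c (pvBlock s r pl) := by
  rw [pvAddAll, pvBlock, pvFoldIns, pvFoldl_flatMap, pvPyRange_natCast s r, List.foldl_map]
  apply PySem.List.foldl_congr_mem
  intro acc a _
  have h1 : ((a : Int) + 1) = ((a + 1 : Nat) : Int) := by push_cast; ring
  have h2 : ((r : Int) + 1) = ((r + 1 : Nat) : Int) := by push_cast; ring
  rw [h1, h2, pvPyRange_natCast (a + 1) (r + 1), List.foldl_map, pvRow, List.foldl_map,
    show (r + 1) - (a + 1) = r - a from by omega]
  rfl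

-- the B-side extension loop performs exactly the row insertions
theorem pvExtend_eq (t : List (Option Int)) (i : Nat) (lab : Int) :
    ∀ e c, pvExtend t i lab e c =
      pvFoldIns c ((List.range' e (pvRend t e lab - e)).map (fun e' : Nat => (((i : Int), (e' : Int) + 1), lab))) := by
  intro e c
  fun_induction pvExtend t i lab e c with
  | case1 e c h ih =>
    have hf : pvF t e = some lab := h.2
    have hstep : pvRend t e lab = pvRend t (e + 1) lab := pvRend_of_step t e lab h.1 hf
    have hge : e + 1 ≤ pvRend t (e + 1) lab := pvRend_ge t (e + 1) lab
    rw [ih, hstep,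
      show pvRend t (e + 1) lab - e = (pvRend t (e + 1) lab - (e + 1)) + 1 from by omega,
      List.range'_succ, List.map_cons]
    simp only [pvFoldIns, List.foldl_cons]
    rfl
  | case2 e c h =>
    rw [pvRend_of_stop t e lab (by simpa [pvF] using h)]
    simp [pvFoldIns]

theorem pvBStep_eq (t : List (Option Int)) (c : PySem.Dict (Int × Int) Int) (i : Nat) :
    pvBStep t c i = pvFoldIns c (pvG t i) := by
  cases hf : t.getD i none with
  | none =>
    have hf' : pvF t i = none := hf
    unfold pvBStep pvG
    rw [hf, hf']
    simp [pvFoldIns]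
  | some lab =>
    have hf' : pvF t i = some lab := hf
    unfold pvBStep pvG
    rw [hf, hf']
    show pvExtend t i lab (i + 1) (c.insert ((i : Int), (i : Int) + 1) lab) =
      pvFoldIns c (pvRow i (pvRend t (i + 1) lab) lab)
    rw [pvExtend_eq]
    have hge : i + 1 ≤ pvRend t (i + 1) lab := pvRend_ge t (i + 1) lab
    rw [pvRow, show pvRend t (i + 1) lab - i = (pvRend t (i + 1) lab - (i + 1)) + 1 from by omega,
      List.range'_succ, List.map_cons]
    simp only [pvFoldIns, List.foldl_cons]
    have hacc : pvIns c (((i : Int), ((i + 1 : Nat) : Int)), lab) = c.insert ((i : Int), (i : Int) + 1) lab := by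
      simp only [pvIns]
      push_cast
      rfl
    rw [hacc]
    congr 1
    apply List.ext_getElem
    · simp
    · intro k h1 h2
      rw [List.getElem_map, List.getElem_map, List.getElem_range', List.getElem_range']
      simp only [Prod.mk.injEq, and_true, true_and]
      push_cast
      ring

theorem pvMach_step (t : List (Option Int)) (j : Nat) (st : PySem.Dict (Int × Int) Int × Option Int × Option Int)
    (hj : j < t.length + 1) : pvMach t j st = pvMach t (j + 1) (pvStepA t st j) := by
  have h : (t.length + 1) - j = ((t.length + 1) - (j + 1)) + 1 := by omega
  rw [pvMach, h, List.range'_succ, List.foldl_cons]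
  rfl

theorem pvMach_stop (t : List (Option Int)) (j : Nat) (st : PySem.Dict (Int × Int) Int × Option Int × Option Int)
    (hj : t.length + 1 ≤ j) : pvMach t j st = st := by
  rw [pvMach, Nat.sub_eq_zero_of_le hj]
  rfl

-- the central invariant of A's run state machine
theorem pvMachMain (t : List (Option Int)) :
    ∀ k j, k = (t.length + 1) - j →
      (∀ c s0, (pvMach t j (c, none, s0)).1 = pvFoldIns c (pvEfrom t j)) ∧
      (∀ c s lab, s < j → j ≤ t.length + 1 → (∀ x, s ≤ x → x < j → pvF t x = some lab) →
        (pvMach t j (c, some lab, some (s : Int))).1 =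
          pvFoldIns c (pvBlock s (pvRend t j lab) lab ++ pvEfrom t (pvRend t j lab))) := by
  intro k
  induction k with
  | zero =>
    intro j hk
    have hj : t.length + 1 ≤ j := by omega
    constructor
    · intro c s0
      rw [pvMach_stop t j _ hj, pvEfrom_stop t j (by omega)]
      rfl
    · intro c s lab hs hj2 hrun
      exfalso
      have hx := hrun t.length (by omega) (by omega)
      rw [pvF_of_ge t t.length le_rfl] at hx
      cases hx
  | succ k ih =>
    intro j hk
    have hj : j < t.length + 1 := by omega
    have ih' := ih (j + 1) (by omega)
    constructor
    · intro c s0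
      rw [pvMach_step t j _ hj]
      cases hf : pvF t j with
      | none =>
        have hst : pvStepA t (c, none, s0) j = (c, none, s0) := by
          simp [pvStepA, pvAStep, hf]
        rw [hst, ih'.1]
        by_cases hjn : j < t.length
        · rw [pvEfrom_cons t j hjn, show pvG t j = [] from by rw [pvG, hf], List.nil_append]
        · rw [pvEfrom_stop t j (by omega), pvEfrom_stop t (j + 1) (by omega)]
      | some lab =>
        have hjn : j < t.length := by
          by_contra hh
          rw [pvF_of_ge t j (by omega)] at hf
          cases hf
        have hst : pvStepA t (c, none, s0) j = (c, some lab, some (j : Int)) := by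
          simp [pvStepA, pvAStep, hf]
        have hrun : ∀ x, j ≤ x → x < j + 1 → pvF t x = some lab := by
          intro x hx1 hx2
          have hxe : x = j := by omega
          subst hxe
          exact hf
        rw [hst, ih'.2 c j lab (by omega) (by omega) hrun, ← pvEfrom_run t j lab hjn hf]
    · intro c s lab hs hj2 hrun
      rw [pvMach_step t j _ hj]
      cases hfj : pvF t j with
      | some lab2 =>
        have hjn : j < t.length := by
          by_contra hh
          rw [pvF_of_ge t j (by omega)] at hfj
          cases hfj
        by_cases heq : lab2 = lab
        · subst heq
          have hst : pvStepA t (c, some lab2, some (s : Int)) j = (c, some lab2, some (s : Int)) := by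
            simp [pvStepA, pvAStep, hfj]
          have hrun2 : ∀ x, s ≤ x → x < j + 1 → pvF t x = some lab2 := by
            intro x hx1 hx2
            by_cases hx : x = j
            · exact hx ▸ hfj
            · exact hrun x hx1 (by omega)
          rw [hst, ih'.2 c s lab2 (by omega) (by omega) hrun2,
            pvRend_of_step t j lab2 hjn hfj]
        · have hst : pvStepA t (c, some lab, some (s : Int)) j =
              (pvAddAll (s : Int) (j : Int) lab c, some lab2, some (j : Int)) := by
            simp [pvStepA, pvAStep, hfj, Ne.symm heq]
          have hrun3 : ∀ x, j ≤ x → x < j + 1 → pvF t x = some lab2 := by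
            intro x hx1 hx2
            have hxe : x = j := by omega
            subst hxe
            exact hfj
          have hrj : pvRend t j lab = j := by
            apply pvRend_of_stop
            intro hc
            rw [hfj] at hc
            exact heq (by injection hc.2)
          rw [hst, ih'.2 _ j lab2 (by omega) (by omega) hrun3, pvAddAll_eq, hrj,
            pvEfrom_run t j lab2 hjn hfj, ← pvFoldIns_append, ← List.append_assoc]
      | none =>
        have hst : pvStepA t (c, some lab, some (s : Int)) j =
            (pvAddAll (s : Int) (j : Int) lab c, none, some (j : Int)) := by
          simp [pvStepA, pvAStep, hfj]
        have hrj : pvRend t j lab = j := by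
          apply pvRend_of_stop
          intro hc
          rw [hfj] at hc
          cases hc.2
        rw [hst, ih'.1, pvAddAll_eq, hrj, ← pvFoldIns_append]
        by_cases hjn : j < t.length
        · rw [pvEfrom_cons t j hjn, show pvG t j = [] from by rw [pvG, hfj], List.nil_append]
        · rw [pvEfrom_stop t j (by omega), pvEfrom_stop t (j + 1) (by omega)]

-- A's emission phase, as the canonical insertion list
theorem pvA_phase (t : List (Option Int)) (c : PySem.Dict (Int × Int) Int) (s0 : Option Int) :
    ((PySem.List.enumerate (t ++ [none]) 0).foldl pvAStep (c, none, s0)).1 = pvFoldIns c (pvEfrom t 0) := by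
  rw [PySem.List.enumerate_eq_map_pyRange (d := none), List.foldl_map]
  have h0 : PySem.List.pyRange 0 (PySem.List.len (t ++ [none])) 1 =
      (List.range' 0 (t.length + 1)).map (fun k : Nat => (k : Int)) := by
    have h1 : PySem.List.len (t ++ [none]) = ((t.length + 1 : Nat) : Int) := by
      simp
    rw [h1, show (0 : Int) = ((0 : Nat) : Int) from rfl, pvPyRange_natCast, Nat.sub_zero]
  rw [h0, List.foldl_map]
  have hcong : (List.range' 0 (t.length + 1)).foldl
        (fun st (j : Nat) => pvAStep st ((j : Int), PySem.List.pyGetD (t ++ [none]) (j : Int) none)) (c, none, s0) =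
      (List.range' 0 (t.length + 1)).foldl (pvStepA t) (c, none, s0) := by
    apply PySem.List.foldl_congr_mem
    intro acc x _
    rw [pvStepA]
    congr 1
    rw [PySem.List.pyGetD_natCast, pvF_append_sentinel]
  rw [hcong]
  have hm : (List.range' 0 (t.length + 1)).foldl (pvStepA t) (c, none, s0) = pvMach t 0 (c, none, s0) := by
    rw [pvMach, Nat.sub_zero]
  rw [hm, (pvMachMain t (t.length + 1) 0 (by omega)).1]

-- B's emission phase, as the same insertion list
theorem pvB_phase (t : List (Option Int)) :
    (List.range t.length).foldl (pvBStep t) PySem.Dict.empty = pvFoldIns PySem.Dict.empty (pvEfrom t 0) := by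
  have H : ∀ k j c, k = t.length - j →
      (List.range' j k).foldl (pvBStep t) c = pvFoldIns c (pvEfrom t j) := by
    intro k
    induction k with
    | zero =>
      intro j c hk
      rw [pvEfrom_stop t j (by omega)]
      rfl
    | succ k ih =>
      intro j c hk
      have hjn : j < t.length := by omega
      rw [List.range'_succ, List.foldl_cons, ih (j + 1) _ (by omega), pvBStep_eq,
        pvEfrom_cons t j hjn, pvFoldIns_append]
  rw [List.range_eq_range']
  exact H t.length 0 _ (by omega)

-- ===== VERDICT (by name: the statement is the Claim_ definition above) =====
theorem take_closure_over_entity_spans_to_labels_spec : Claim_equal_take_closure_over_entity_spans_to_labels := by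
  intro l _hdom _hpre
  unfold Spec_take_closure_over_entity_spans_to_labels
  unfold take_closure_over_entity_spans_to_labels take_closure_over_entity_spans_to_labels_alt
  by_cases h : l.length = 0
  · simp [h]
  · simp only [h, if_false]
    rw [pvA_phase, pvB_phase]
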